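-- pv_equiv track=rewrite | github.com/Vad1mChK/NeuroPoetBot | neuropoet-poetry/src/preprocessing/preprocessing_utils.py | impute_rhyme_scheme
-- ===== SOURCE A (Python) =====
-- import string
--
-- def impute_rhyme_scheme(rhyme_scheme: str) -> str | None:
--     '''
--     Attempts to find the largest existing letter in the rhyme_scheme,
--     then imputes unfilled lines ("-") with newly generated letters.
--
--     Examples:
--     - "AA--"  → "AABC"
--     - "A-A-A" → "ABACA"
--     - "-A-A"  → "BACA"
--
--     Returns None if it runs out of capital Latin letters.
--     '''
--     letters = list(string.ascii_uppercase)
--     used_letters = set(filter(lambda c: c in letters, rhyme_scheme))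
--
--     if not letters:
--         return None
--
--     imputed_scheme = ""
--     next_letter_index = 0
--
--     for char in rhyme_scheme:
--         if char == "-":
--             while letters[next_letter_index] in used_letters:
--                 next_letter_index += 1
--                 if next_letter_index >= len(letters):
--                     return None  # Ran out of letters
--
--             new_letter = letters[next_letter_index]
--             used_letters.add(new_letter)
--             imputed_scheme += new_letter
--         else:
--             imputed_scheme += char
--
--     return imputed_scheme
-- ===== SOURCE B (Python) =====
-- import string
--
-- def impute_rhyme_scheme(rhyme_scheme: str) -> str | None:
--     segs = rhyme_scheme.split('-')
--     need = len(segs) - 1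
--     fresh = [c for c in string.ascii_uppercase if c not in rhyme_scheme][:need]
--     if len(fresh) < need:
--         return None
--     out = segs[0]
--     for letter, seg in zip(fresh, segs[1:]):
--         out += letter + seg
--     return out
-- ===== Notes on version B (the rewrite author's own statement) =====
-- stated objective: faster
-- what changed: B splits the scheme at the dash placeholders into segments, computes the needed number of fresh letters as the segment count minus one, takes that many unused uppercase letters from the alphabet up front (deciding the None case before building anything), and rejoins the segments interleaved with the fresh letters, instead of A's per-character scan with a forward alphabet pointer, an inner while-skip over a growing used-set and quadratic string concatenation.
import Mathlib
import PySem

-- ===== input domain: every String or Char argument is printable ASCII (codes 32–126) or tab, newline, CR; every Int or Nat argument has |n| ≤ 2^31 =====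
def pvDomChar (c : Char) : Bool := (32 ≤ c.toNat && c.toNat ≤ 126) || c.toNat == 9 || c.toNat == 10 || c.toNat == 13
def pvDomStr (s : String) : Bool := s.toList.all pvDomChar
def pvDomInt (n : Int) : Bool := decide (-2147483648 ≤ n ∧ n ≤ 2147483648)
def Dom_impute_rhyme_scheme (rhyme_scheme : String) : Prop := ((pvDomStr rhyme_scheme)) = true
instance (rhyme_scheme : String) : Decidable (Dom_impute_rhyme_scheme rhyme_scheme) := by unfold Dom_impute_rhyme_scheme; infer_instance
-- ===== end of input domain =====

-- B splits the scheme at the dashes, takes the needed number of unused uppercase letters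
-- up front, and rejoins the segments interleaved with them, instead of A's per-character
-- scan with an alphabet pointer and repeated concatenation (objective: faster).

-- ===== PORT A =====
-- string.ascii_uppercase as a list of characters
def azLetters : List Char := "ABCDEFGHIJKLMNOPQRSTUVWXYZ".toList

-- the inner 'while letters[next_letter_index] in used_letters' loop of A:
-- returns the final index, or none where Python hits 'return None  # Ran out of letters'
def skipUsed (used : PySem.Set Char) (idx : Nat) : Option Nat :=
  if h : idx < azLetters.length then
    if azLetters[idx]'h ∈ used then
      if idx + 1 ≥ azLetters.length then none
      else skipUsed used (idx + 1)
    else some idx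
  else none  -- unreachable: the loop is only entered with idx < len(letters)
termination_by azLetters.length - idx

-- the 'for char in rhyme_scheme' loop of A, carrying (imputed_scheme, next_letter_index, used_letters)
def loopA (cs : List Char) (acc : List Char) (idx : Nat) (used : PySem.Set Char) :
    Option (List Char) :=
  match cs with
  | [] => some acc
  | c :: rest =>
    if c = '-' then
      match skipUsed used idx with
      | none => none
      | some i =>
        let nl := azLetters.getD i 'A'  -- i < len(letters) always holds here, so getD = letters[i]
        loopA rest (acc ++ [nl]) i (PySem.Set.add used nl)
    else loopA rest (acc ++ [c]) idx used

def impute_rhyme_scheme (rhyme_scheme : String) : Option String :=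
  let letters := azLetters
  let used := PySem.Set.ofList (rhyme_scheme.toList.filter (fun c => decide (c ∈ letters)))
  if letters.isEmpty then none
  else (loopA rhyme_scheme.toList [] 0 used).map String.ofList

-- ===== PORT B =====
def impute_rhyme_scheme_alt (rhyme_scheme : String) : Option String :=
  let cs := rhyme_scheme.toList
  -- segs = rhyme_scheme.split('-'); split on a nonempty separator is PySem.Chars.splitOn
  match PySem.Chars.splitOn cs ['-'] with
  | [] => none  -- unreachable: str.split always returns at least one segment
  | s0 :: rest =>
    let need := rest.length  -- need = len(segs) - 1
    -- fresh = [c for c in string.ascii_uppercase if c not in rhyme_scheme][:need]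
    let fresh := (azLetters.filter (fun c => !(PySem.Chars.isIn [c] cs))).take need
    if fresh.length < need then none
    else
      -- out = segs[0]; for letter, seg in zip(fresh, segs[1:]): out += letter + seg
      some (String.ofList
        (List.foldl (fun out p => out ++ p.1 :: p.2) s0 (fresh.zip rest)))

-- ===== PRECONDITION & SPEC =====
def Spec_impute_rhyme_scheme (rhyme_scheme : String) (out : Option String) : Prop := out = impute_rhyme_scheme_alt rhyme_scheme
instance (rhyme_scheme : String) (out : Option String) : Decidable (Spec_impute_rhyme_scheme rhyme_scheme out) := by unfold Spec_impute_rhyme_scheme; infer_instance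

-- ===== CLAIM (what is proved, stated in full; the proofs are below) =====
def Claim_equal_impute_rhyme_scheme : Prop := ∀ (rhyme_scheme : String), Dom_impute_rhyme_scheme rhyme_scheme → Spec_impute_rhyme_scheme rhyme_scheme (impute_rhyme_scheme rhyme_scheme)

-- ===== LEMMAS AND PROOFS =====

theorem azLetters_nodup : azLetters.Nodup := by decide

-- the intermediate shape both ports are reduced to: a single flat pass consuming a pool
def loopB (cs : List Char) (acc : List Char) (avail : List Char) : Option (List Char) :=
  match cs with
  | [] => some acc
  | c :: rest =>
    if c = '-' then
      match avail with
      | [] => none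
      | a :: more => loopB rest (acc ++ [a]) more
    else loopB rest (acc ++ [c]) avail

-- characterisation of the inner while loop: it either exhausts the free letters (none)
-- or stops at the first index ≥ idx whose letter is unused
theorem skipUsed_cases (used : PySem.Set Char) (idx : Nat) :
    ((azLetters.drop idx).filter (fun c => decide (c ∉ used)) = [] ∧ skipUsed used idx = none)
    ∨ (∃ i, ∃ h : i < azLetters.length, skipUsed used idx = some i ∧
        (azLetters.drop idx).filter (fun c => decide (c ∉ used)) =
          (azLetters[i]'h) :: (azLetters.drop (i + 1)).filter (fun c => decide (c ∉ used))) := by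
  fun_induction skipUsed used idx with
  | case1 idx h hmem hge =>
    left
    refine ⟨List.filter_eq_nil_iff.mpr ?_, rfl⟩
    intro a ha
    rw [List.drop_eq_getElem_cons h, List.drop_eq_nil_of_le (by omega)] at ha
    simp only [List.mem_singleton] at ha
    simpa [ha] using hmem
  | case2 idx h hmem hge ih =>
    have hstep : skipUsed used idx = skipUsed used (idx + 1) := by
      rw [skipUsed.eq_def]; simp [h, hmem, hge]
    rcases ih with ⟨hf, hn⟩ | ⟨i, hi, hs, hf⟩
    · left
      refine ⟨?_, hstep ▸ hn⟩
      rw [List.drop_eq_getElem_cons h, List.filter_cons, if_neg (by simp [hmem]), hf]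
    · right
      refine ⟨i, hi, hstep ▸ hs, ?_⟩
      rw [List.drop_eq_getElem_cons h, List.filter_cons, if_neg (by simp [hmem]), hf]
  | case3 idx h hmem =>
    right
    refine ⟨idx, h, rfl, ?_⟩
    rw [List.drop_eq_getElem_cons h, List.filter_cons, if_pos (by simp [hmem])]
  | case4 idx h =>
    left
    refine ⟨?_, rfl⟩
    rw [List.drop_eq_nil_of_le (by omega), List.filter_nil]

-- adding the consumed letter to 'used' does not change the filter over the rest of the
-- alphabet, because azLetters has no duplicates
theorem filter_add_drop (used : PySem.Set Char) (i : Nat) (h : i < azLetters.length) :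
    (azLetters.drop (i + 1)).filter (fun c => decide (c ∉ PySem.Set.add used (azLetters[i]'h))) =
    (azLetters.drop (i + 1)).filter (fun c => decide (c ∉ used)) := by
  apply List.filter_congr
  intro c hc
  have hne : c ≠ azLetters[i]'h := by
    have hnd : (azLetters.drop i).Nodup := azLetters_nodup.sublist (List.drop_sublist i azLetters)
    rw [List.drop_eq_getElem_cons h] at hnd
    intro hEq
    exact (List.nodup_cons.mp hnd).1 (hEq ▸ hc)
  simp [PySem.Set.mem_add, hne]

-- A's loop invariant: A's (idx, used) state corresponds to the remaining pool of loopB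
theorem loop_eq (cs : List Char) (acc : List Char) (idx : Nat) (used : PySem.Set Char) :
    loopA cs acc idx used =
    loopB cs acc ((azLetters.drop idx).filter (fun c => decide (c ∉ used))) := by
  induction cs generalizing acc idx used with
  | nil => rfl
  | cons c rest ih =>
    by_cases hc : c = '-'
    · subst hc
      rcases skipUsed_cases used idx with ⟨hf, hn⟩ | ⟨i, hi, hs, hf⟩
      · simp only [loopA, loopB, reduceIte, hn, hf]
      · simp only [loopA, loopB, reduceIte, hs, hf]
        have hgd : azLetters.getD i 'A' = azLetters[i]'hi := List.getD_eq_getElem _ _ hi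
        rw [hgd, ih]
        congr 1
        rw [List.drop_eq_getElem_cons hi, List.filter_cons,
          if_neg (by simp [PySem.Set.mem_add]), filter_add_drop used i hi]
    · simp only [loopA, loopB, if_neg hc]
      exact ih _ _ _

-- proof-side model of split('-'): always returns at least one segment
def splitDashes : List Char → List (List Char)
  | [] => [[]]
  | c :: r =>
    if c = '-' then [] :: splitDashes r
    else
      match splitDashes r with
      | [] => [[c]]  -- unreachable
      | s :: ss => (c :: s) :: ss

theorem splitDashes_ne_nil (cs : List Char) : splitDashes cs ≠ [] := by
  cases cs with
  | nil => simp [splitDashes]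
  | cons c r =>
    simp only [splitDashes]
    split <;> simp_all
    split <;> simp_all

-- PySem's fuel-based split specialises to splitDashes for the single-char separator '-'
theorem splitOn_go_eq (l : List Char) (fuel : Nat) (cur : List Char)
    (acc : List (List Char)) (hf : l.length ≤ fuel) :
    PySem.Chars.splitOn.go ['-'] fuel l cur acc =
      acc.reverse ++ (match splitDashes l with
        | [] => []
        | s :: ss => (cur.reverse ++ s) :: ss) := by
  induction l generalizing fuel cur acc with
  | nil =>
    cases fuel with
    | zero => simp [PySem.Chars.splitOn.go, splitDashes]
    | succ f => simp [PySem.Chars.splitOn.go, splitDashes]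
  | cons c rest ih =>
    cases fuel with
    | zero => simp at hf
    | succ f =>
      rw [PySem.Chars.splitOn.go]
      by_cases hc : c = '-'
      · subst hc
        have hpre : List.isPrefixOf ['-'] ('-' :: rest) = true := by
          simp [List.isPrefixOf]
        rw [if_pos hpre]
        have := ih f [] (List.reverse cur :: acc) (by simpa using Nat.le_of_succ_le_succ hf)
        simp only [List.length_nil, List.length_cons, List.drop_succ_cons, List.drop_zero]
        rw [this]
        rcases h : splitDashes rest with _ | ⟨s, ss⟩
        · exact absurd h (splitDashes_ne_nil rest)
        · simp [splitDashes, h]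
      · have hpre : List.isPrefixOf ['-'] (c :: rest) = false := by
          simp only [List.isPrefixOf, Bool.and_true,
            Bool.eq_false_iff, ne_eq, beq_iff_eq]
          exact fun h => hc h.symm
        rw [if_neg (by simp [hpre])]
        have := ih f (c :: cur) acc (by simpa using Nat.le_of_succ_le_succ hf)
        rw [this]
        rcases h : splitDashes rest with _ | ⟨s, ss⟩
        · exact absurd h (splitDashes_ne_nil rest)
        · simp [splitDashes, hc, h]

theorem splitOn_eq_splitDashes (cs : List Char) :
    PySem.Chars.splitOn cs ['-'] = splitDashes cs := by
  rw [PySem.Chars.splitOn, splitOn_go_eq cs (cs.length + 1) [] [] (by omega)]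
  rcases h : splitDashes cs with _ | ⟨s, ss⟩
  · exact absurd h (splitDashes_ne_nil cs)
  · simp

theorem singleton_infix_iff (c : Char) (l : List Char) : [c] <:+: l ↔ c ∈ l := by
  constructor
  · intro h; exact h.subset (List.mem_singleton_self c)
  · intro h
    obtain ⟨s, t, rfl⟩ := List.append_of_mem h
    exact ⟨s, t, by simp⟩

-- B's precomputed pool equals the pool loopB is fed by A's reduction
theorem avail_eq (cs : List Char) :
    azLetters.filter (fun c => !(PySem.Chars.isIn [c] cs)) =
    azLetters.filter (fun c =>
      decide (c ∉ PySem.Set.ofList (cs.filter (fun c => decide (c ∈ azLetters))))) := by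
  apply List.filter_congr
  intro c hc
  rcases h : PySem.Chars.isIn [c] cs with _ | _
  · have : c ∉ cs := fun hm =>
      ((PySem.Chars.isIn_eq_false_iff _ _).mp h) ((singleton_infix_iff c cs).mpr hm)
    simp [PySem.Set.mem_ofList, List.mem_filter, this]
  · have : c ∈ cs := (singleton_infix_iff c cs).mp ((PySem.Chars.isIn_iff_infix _ _).mp h)
    simp [PySem.Set.mem_ofList, List.mem_filter, this, hc]

-- loopB computed segment-wise: it is exactly B's split/take/interleave expression
theorem loopB_eq_split (cs : List Char) (acc avail : List Char) :
    loopB cs acc avail =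
      match splitDashes cs with
      | [] => none
      | s0 :: rest =>
        if avail.length < rest.length then none
        else some (acc ++ s0 ++
          ((avail.take rest.length).zip rest).flatMap (fun p => p.1 :: p.2)) := by
  induction cs generalizing acc avail with
  | nil => simp [loopB, splitDashes]
  | cons c r ih =>
    by_cases hc : c = '-'
    · subst hc
      rcases h : splitDashes r with _ | ⟨s0, ss⟩
      · exact absurd h (splitDashes_ne_nil r)
      · cases avail with
        | nil =>
          simp [loopB, splitDashes, h]
        | cons a more =>
          simp only [loopB, reduceIte, ih, h, splitDashes]
          simp only [List.length_cons, Nat.add_lt_add_iff_right, List.take_succ_cons,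
            List.zip_cons_cons, List.flatMap_cons]
          split <;> simp
    · rcases h : splitDashes r with _ | ⟨s0, ss⟩
      · exact absurd h (splitDashes_ne_nil r)
      · simp only [loopB, if_neg hc, ih, h, splitDashes]
        split <;> simp [List.append_assoc]

-- ===== VERDICT (by name: the statement is the Claim_ definition above) =====
theorem impute_rhyme_scheme_spec : Claim_equal_impute_rhyme_scheme := by
  intro s _
  show impute_rhyme_scheme s = impute_rhyme_scheme_alt s
  simp only [impute_rhyme_scheme, impute_rhyme_scheme_alt]
  rw [if_neg (by decide), loop_eq, List.drop_zero, loopB_eq_split,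
    splitOn_eq_splitDashes]
  rcases h : splitDashes s.toList with _ | ⟨s0, rest⟩
  · exact absurd h (splitDashes_ne_nil s.toList)
  · simp only [avail_eq]
    set avail := azLetters.filter (fun c =>
      decide (c ∉ PySem.Set.ofList (s.toList.filter (fun c => decide (c ∈ azLetters))))) with havail
    have hlen : (avail.take rest.length).length = min rest.length avail.length :=
      List.length_take
    by_cases hlt : avail.length < rest.length
    · rw [if_pos hlt, if_pos (by omega)]
      simp
    · rw [if_neg hlt, if_neg (by omega)]
      simp [List.flatMap_def]
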